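/- GENERATED by tools/from_farm_form.py from prooffarm-gif/accepted/gif_decode.1/Proof.lean (a worked proof of the farm's unit `gif_decode.1`,
   accepted by the verdict) — do not edit. -/
import Gif.Spec.Units.gif_decode_1
import Gif.Spec.AllSegs
import Gif.Spec.Proved.gif_decode_1_Lemmas

open X86 X86.User Asan ProgX.Base ProgX.Base.Spec Gif.Spec

/-!
  `gif_decode.1` (0x10adda … 0x10aeb3, 41 instructions; gif_driver.c:183-197): THE REPORT IS FILLED WITH ITS DEFAULTS. One unchecked
  store into the own frame (`error = 0`), thirteen checked stores into the caller's report; no contract call. One walk (Lemmas.lean).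
-/

/-- Segment 1 of `gif_decode` takes `Body` at 0x10adda to `Filled` at 0x10aeb3. -/
theorem Gif.Spec.Proved.gif_decode_1_ok : Gif.Spec.gif_decode_1.Statement := by
  intro Lay hLay μ hμ u₀ hcode h_asan_store4_noabort h_asan_store8_noabort H rest frames e ret v hat
  -- 0x10adda … 0x10aeb3
  exact Gif.Spec.gif_decode_1.gd1_seg_fill Lay hLay μ hμ u₀ hcode H rest frames e ret h_asan_store4_noabort
    h_asan_store8_noabort v hat
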